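-- pv_equiv track=rewrite | github.com/isc-projects/kea | tools/system_messages.py | removeEmptyLeadingTrailing
-- ===== SOURCE A (Python) =====
-- def removeEmptyLeadingTrailing(lines):
--     """Removes leading and trailing empty lines.
--
--        A list of strings is passed as argument, some of which may be empty.
--        This function removes from the start and end of list a contiguous
--        sequence of empty lines and returns the result.  Embedded sequence of
--        empty lines are not touched.
--
--        Parameters:
--        lines List of strings to be modified.
--
--        Return:
--        Input list of strings with leading/trailing blank line sequences
--        removed.
--     """
--
--     retlines = []
--
--     # Dispose of degenerate case of empty array
--     if len(lines) == 0:
--         return retlines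
--
--     # Search for first non-blank line
--     start = 0
--     while start < len(lines):
--         if len(lines[start]) > 0:
--             break
--         start = start + 1
--
--     # Handle case when entire list is empty
--     if start >= len(lines):
--         return retlines
--
--     # Search for last non-blank line
--     finish = len(lines) - 1
--     while finish >= 0:
--         if len(lines[finish]) > 0:
--             break
--         finish = finish - 1
--
--     retlines = lines[start:finish + 1]
--     return retlines
-- ===== SOURCE B (Python) =====
-- def removeEmptyLeadingTrailing(lines):
--     """Single forward pass: accumulate non-blank lines into `out`; blank lines
--     seen after the first non-blank line wait in `pending` and are flushed into
--     `out` only when another non-blank line arrives, so leading blanks are never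
--     added and trailing blanks die in `pending`."""
--     out = []
--     pending = []
--     for l in lines:
--         if len(l) > 0:
--             out.extend(pending)
--             out.append(l)
--             pending = []
--         elif out:
--             pending.append(l)
--     return out
-- ===== Notes on version B (the rewrite author's own statement) =====
-- stated objective: alternative
-- what changed: Replaces A's two early-stopping index scans from each end plus a slice by a single forward fold that accumulates non-blank output and buffers interior blank runs in a pending list flushed on the next non-blank line.
import Mathlib
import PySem

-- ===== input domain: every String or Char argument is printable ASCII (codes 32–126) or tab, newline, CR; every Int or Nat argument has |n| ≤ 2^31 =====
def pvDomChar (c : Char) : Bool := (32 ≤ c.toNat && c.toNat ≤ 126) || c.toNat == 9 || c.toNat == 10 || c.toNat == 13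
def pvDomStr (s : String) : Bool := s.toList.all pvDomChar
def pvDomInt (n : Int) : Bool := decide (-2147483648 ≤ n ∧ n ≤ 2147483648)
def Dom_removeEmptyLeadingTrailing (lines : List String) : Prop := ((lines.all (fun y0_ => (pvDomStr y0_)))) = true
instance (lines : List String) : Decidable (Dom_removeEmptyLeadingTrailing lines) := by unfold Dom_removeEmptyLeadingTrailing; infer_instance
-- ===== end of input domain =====

-- B replaces A's two early-stopping index scans plus slice by one forward fold with a pending-blank buffer (alternative decomposition, same cost).

-- ===== PORT A =====
-- while start < len(lines): if len(lines[start]) > 0: break; start += 1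
def findStartA (lines : List String) (start : Int) : Int :=
  if h : start < (lines.length : Int) then
    if 0 < PySem.Str.len (PySem.List.pyGetD lines start "") then start
    else findStartA lines (start + 1)
  else start
termination_by ((lines.length : Int) - start).toNat
decreasing_by omega

-- while finish >= 0: if len(lines[finish]) > 0: break; finish -= 1
def findFinishA (lines : List String) (finish : Int) : Int :=
  if h : 0 ≤ finish then
    if 0 < PySem.Str.len (PySem.List.pyGetD lines finish "") then finish
    else findFinishA lines (finish - 1)
  else finish
termination_by (finish + 1).toNat
decreasing_by omega

def removeEmptyLeadingTrailing (lines : List String) : List String :=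
  let retlines : List String := []
  if lines.length = 0 then retlines
  else
    let start := findStartA lines 0
    if (lines.length : Int) ≤ start then retlines
    else
      let finish := findFinishA lines ((lines.length : Int) - 1)
      PySem.List.slice lines (some start) (some (finish + 1))

-- ===== PORT B =====
-- one forward fold; state (out, pending): pending buffers blank lines seen after the first non-blank
def removeEmptyLeadingTrailing_alt (lines : List String) : List String :=
  (lines.foldl
    (fun (st : List String × List String) l =>
      if 0 < PySem.Str.len l then (st.1 ++ st.2 ++ [l], [])
      else if st.1.isEmpty then st
      else (st.1, st.2 ++ [l]))
    ([], [])).1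

-- ===== PRECONDITION & SPEC =====
def Spec_removeEmptyLeadingTrailing (lines : List String) (out : List String) : Prop := out = removeEmptyLeadingTrailing_alt lines
instance (lines : List String) (out : List String) : Decidable (Spec_removeEmptyLeadingTrailing lines out) := by unfold Spec_removeEmptyLeadingTrailing; infer_instance

-- ===== CLAIM (what is proved, stated in full; the proofs are below) =====
def Claim_equal_removeEmptyLeadingTrailing : Prop := ∀ (lines : List String), Dom_removeEmptyLeadingTrailing lines → Spec_removeEmptyLeadingTrailing lines (removeEmptyLeadingTrailing lines)

-- ===== LEMMAS AND PROOFS =====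

-- the blank-line test, as a Bool predicate
def pvBlank (s : String) : Bool := s.toList.isEmpty

-- drop trailing blank lines
def pvDropTrail (xs : List String) : List String := (xs.reverse.dropWhile pvBlank).reverse

-- B's fold step, named
def pvStep (st : List String × List String) (l : String) : List String × List String :=
  if 0 < PySem.Str.len l then (st.1 ++ st.2 ++ [l], [])
  else if st.1.isEmpty then st
  else (st.1, st.2 ++ [l])

theorem pvBlank_false_iff (s : String) : pvBlank s = false ↔ 0 < PySem.Str.len s := by
  cases h : s.toList <;> simp [pvBlank, PySem.Str.len_eq, h]

theorem dropWhile_append_cons_of_neg {α : Type} (p : α → Bool) (l : α) (hp : p l = false)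
    (a b : List α) : List.dropWhile p (a ++ l :: b) = List.dropWhile p a ++ l :: b := by
  rw [List.dropWhile_append]
  by_cases h : (List.dropWhile p a).isEmpty <;> simp_all

theorem pvDropTrail_append_cons (a : List String) (l : String) (b : List String)
    (hl : pvBlank l = false) : pvDropTrail (a ++ l :: b) = a ++ l :: pvDropTrail b := by
  unfold pvDropTrail
  have : (a ++ l :: b).reverse = b.reverse ++ l :: a.reverse := by simp
  rw [this, dropWhile_append_cons_of_neg pvBlank l hl]
  simp

theorem pvDropTrail_eq_nil (xs : List String) (h : ∀ x ∈ xs, pvBlank x = true) :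
    pvDropTrail xs = [] := by
  unfold pvDropTrail
  rw [List.dropWhile_eq_nil_iff.mpr (by simpa using h)]
  rfl

theorem dropWhile_eq_drop {α : Type} (p : α → Bool) (xs : List α) :
    List.dropWhile p xs = xs.drop (xs.takeWhile p).length := by
  calc List.dropWhile p xs
      = List.drop (xs.takeWhile p).length (xs.takeWhile p ++ xs.dropWhile p) := List.drop_left.symm
    _ = xs.drop (xs.takeWhile p).length := by rw [List.takeWhile_append_dropWhile]

theorem pvDropTrail_take (ys : List String) :
    pvDropTrail ys = ys.take (ys.length - (ys.reverse.takeWhile pvBlank).length) := by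
  unfold pvDropTrail
  rw [dropWhile_eq_drop, List.drop_reverse, List.reverse_reverse]

theorem pvB_loop_ne (xs : List String) : ∀ (out pending : List String), out ≠ [] →
    (∀ x ∈ pending, pvBlank x = true) →
    (xs.foldl pvStep (out, pending)).1 = out ++ pvDropTrail (pending ++ xs) := by
  induction xs with
  | nil =>
    intro out pending ho hp
    simp [pvDropTrail_eq_nil pending hp]
  | cons l xs ih =>
    intro out pending ho hp
    by_cases hl : 0 < PySem.Str.len l
    · have hbl : pvBlank l = false := (pvBlank_false_iff l).mpr hl
      simp only [List.foldl_cons, pvStep, if_pos hl]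
      rw [ih (out ++ pending ++ [l]) [] (by simp) (by simp)]
      rw [pvDropTrail_append_cons pending l xs hbl]
      simp
    · have hbl : pvBlank l = true := by
        cases h : pvBlank l
        · exact absurd ((pvBlank_false_iff l).mp h) hl
        · rfl
      have ho' : out.isEmpty = false := by simpa [List.isEmpty_iff] using ho
      simp only [List.foldl_cons, pvStep, if_neg hl, ho', Bool.false_eq_true, if_false]
      rw [ih out (pending ++ [l]) ho (by intro x hx; rcases List.mem_append.1 hx with h | h
                                         · exact hp x h
                                         · simp at h; subst h; exact hbl)]
      simp

theorem pvB_eq (xs : List String) :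
    (xs.foldl pvStep ([], [])).1 = pvDropTrail (xs.dropWhile pvBlank) := by
  induction xs with
  | nil => rfl
  | cons l xs ih =>
    by_cases hl : 0 < PySem.Str.len l
    · have hbl : pvBlank l = false := (pvBlank_false_iff l).mpr hl
      simp only [List.foldl_cons, pvStep, if_pos hl, List.nil_append]
      rw [pvB_loop_ne xs [l] [] (by simp) (by simp), List.dropWhile_cons_of_neg (by simp [hbl]),
        show (l :: xs) = [] ++ l :: xs from rfl, pvDropTrail_append_cons [] l xs hbl]
      simp
    · have hbl : pvBlank l = true := by
        cases h : pvBlank l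
        · exact absurd ((pvBlank_false_iff l).mp h) hl
        · rfl
      simp only [List.foldl_cons, pvStep, if_neg hl, List.isEmpty_nil, if_true]
      rw [ih, List.dropWhile_cons_of_pos hbl]

theorem pvB_eq' (xs : List String) :
    removeEmptyLeadingTrailing_alt xs = pvDropTrail (xs.dropWhile pvBlank) := by
  unfold removeEmptyLeadingTrailing_alt
  exact pvB_eq xs

theorem pvFS (lines : List String) : ∀ s : Nat, s ≤ lines.length →
    findStartA lines (s : Int) =
      ((lines.length - (List.dropWhile pvBlank (lines.drop s)).length : Nat) : Int) := by
  intro s hs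
  induction hd : lines.length - s generalizing s with
  | zero =>
    have : s = lines.length := by omega
    subst this
    rw [findStartA]
    simp
  | succ n ih =>
    have hlt : s < lines.length := by omega
    rw [findStartA, dif_pos (by exact_mod_cast hlt)]
    have hget : PySem.List.pyGetD lines (s : Int) "" = lines[s] := by
      rw [PySem.List.pyGetD_natCast]
      exact List.getD_eq_getElem lines "" hlt
    rw [hget, List.drop_eq_getElem_cons hlt]
    by_cases hl : 0 < PySem.Str.len lines[s]
    · rw [if_pos hl, List.dropWhile_cons_of_neg (by simp [(pvBlank_false_iff _).mpr hl])]
      simp only [List.length_cons, List.length_drop]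
      omega
    · have hbl : pvBlank lines[s] = true := by
        cases h : pvBlank lines[s]
        · exact absurd ((pvBlank_false_iff _).mp h) hl
        · rfl
      rw [if_neg hl, List.dropWhile_cons_of_pos hbl,
        show ((s : Int) + 1) = ((s+1 : Nat) : Int) by push_cast; ring,
        ih (s+1) (by omega) (by omega)]

theorem pvFF (lines : List String) : ∀ k : Nat, k ≤ lines.length →
    findFinishA lines ((k : Int) - 1) =
      (k : Int) - 1 - (((lines.take k).reverse.takeWhile pvBlank).length : Int) := by
  intro k hk
  induction k with
  | zero =>
    rw [findFinishA]
    simp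
  | succ k ih =>
    have hlt : k < lines.length := by omega
    rw [findFinishA, dif_pos (by omega)]
    have hget : PySem.List.pyGetD lines ((k:Int) + 1 - 1) "" = lines[k] := by
      rw [show ((k:Int) + 1 - 1) = (k:Int) by ring,
        PySem.List.pyGetD_natCast]
      exact List.getD_eq_getElem lines "" hlt
    have htk : (lines.take (k+1)).reverse = lines[k] :: (lines.take k).reverse := by
      rw [List.take_add_one, List.getElem?_eq_getElem hlt]
      simp
    push_cast
    rw [hget, htk]
    by_cases hl : 0 < PySem.Str.len lines[k]
    · rw [if_pos hl, List.takeWhile_cons_of_neg (by simp [(pvBlank_false_iff _).mpr hl])]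
      simp
    · have hbl : pvBlank lines[k] = true := by
        cases h : pvBlank lines[k]
        · exact absurd ((pvBlank_false_iff _).mp h) hl
        · rfl
      rw [if_neg hl, List.takeWhile_cons_of_pos hbl,
        show ((k : Int) + 1 - 1 - 1) = (k : Int) - 1 by ring, ih (by omega)]
      simp
      ring

theorem pvA_eq (lines : List String) :
    removeEmptyLeadingTrailing lines = pvDropTrail (lines.dropWhile pvBlank) := by
  unfold removeEmptyLeadingTrailing
  by_cases hnil : lines.length = 0
  · rw [List.length_eq_zero_iff] at hnil
    subst hnil
    rfl
  · rw [if_neg hnil]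
    have hfs := pvFS lines 0 (by omega)
    simp only [Nat.cast_zero, List.drop_zero] at hfs
    by_cases hempty : (List.dropWhile pvBlank lines).length = 0
    · rw [hfs, hempty, Nat.sub_zero, if_pos le_rfl,
        List.eq_nil_of_length_eq_zero hempty]
      rfl
    · have hL1n : (List.dropWhile pvBlank lines).length ≤ lines.length :=
        List.length_dropWhile_le pvBlank lines
      rw [hfs, if_neg (by push_cast; omega)]
      show PySem.List.slice lines
          (some ((lines.length - (List.dropWhile pvBlank lines).length : Nat) : Int))
          (some (findFinishA lines ((lines.length : Int) - 1) + 1))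
        = pvDropTrail (List.dropWhile pvBlank lines)
      have hff := pvFF lines lines.length le_rfl
      rw [List.take_length] at hff
      rw [hff]
      have hne : List.dropWhile pvBlank lines ≠ [] := by
        intro h; exact hempty (by rw [h]; rfl)
      have hhead : pvBlank ((List.dropWhile pvBlank lines).head hne) = false :=
        List.head_dropWhile_not pvBlank hne
      -- the trailing-blank run of lines lies entirely inside its blank-stripped tail
      have hrev : lines.reverse =
          (List.dropWhile pvBlank lines).reverse ++ (List.takeWhile pvBlank lines).reverse := by
        rw [← List.reverse_append, List.takeWhile_append_dropWhile]
      have htw_ne : ((List.dropWhile pvBlank lines).reverse.takeWhile pvBlank).length ≠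
          (List.dropWhile pvBlank lines).reverse.length := by
        intro h
        have heq : (List.dropWhile pvBlank lines).reverse.takeWhile pvBlank =
            (List.dropWhile pvBlank lines).reverse :=
          (List.takeWhile_prefix pvBlank).eq_of_length h
        have hmem : (List.dropWhile pvBlank lines).head hne ∈
            (List.dropWhile pvBlank lines).reverse := by
          rw [List.mem_reverse]; exact List.head_mem hne
        have := List.mem_takeWhile_imp (heq ▸ hmem)
        rw [hhead] at this
        exact Bool.false_ne_true this
      have hT : (lines.reverse.takeWhile pvBlank).length =
          ((List.dropWhile pvBlank lines).reverse.takeWhile pvBlank).length := by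
        rw [hrev, List.takeWhile_append, if_neg htw_ne]
      have hTlt : (lines.reverse.takeWhile pvBlank).length <
          (List.dropWhile pvBlank lines).length := by
        have h1 := (List.takeWhile_prefix (p := pvBlank) (l := (List.dropWhile pvBlank lines).reverse)).length_le
        simp only [List.length_reverse] at h1
        rw [hT]
        simp only [List.length_reverse] at htw_ne ⊢
        omega
      have hTn : (lines.reverse.takeWhile pvBlank).length ≤ lines.length := by
        have := (List.takeWhile_prefix (p := pvBlank) (l := lines.reverse)).length_le
        simpa using this
      rw [show ((lines.length : Int) - 1 - ↑(lines.reverse.takeWhile pvBlank).length + 1)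
            = ((lines.length - (lines.reverse.takeWhile pvBlank).length : Nat) : Int) by
          push_cast [Nat.cast_sub hTn]; ring,
        PySem.List.slice_natCast]
      have hlen : (lines.takeWhile pvBlank).length + (List.dropWhile pvBlank lines).length
          = lines.length := by
        conv_rhs => rw [← List.takeWhile_append_dropWhile (p := pvBlank) (l := lines)]
        rw [List.length_append]
      have hys := dropWhile_eq_drop pvBlank lines
      rw [pvDropTrail_take, ← hT]
      conv_rhs => rw [hys]
      simp only [List.length_drop]
      congr 1
      all_goals first
        | omega
        | (congr 1; omega)

-- ===== VERDICT (by name: the statement is the Claim_ definition above) =====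
theorem removeEmptyLeadingTrailing_spec : Claim_equal_removeEmptyLeadingTrailing := by
  intro lines _
  unfold Spec_removeEmptyLeadingTrailing
  rw [pvA_eq, pvB_eq']
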